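-- pv_equiv track=rewrite | github.com/Ramji-Purwar/chess | check_detector.py | is_attacked_by_king
-- ===== SOURCE A (Python) =====
-- def is_attacked_by_king(board_string: str, row: int, col: int, attacker: str) -> bool:
--     """Check if position is attacked by enemy king"""
--     king_moves = [
--         (1, 0), (-1, 0), (0, 1), (0, -1),
--         (1, 1), (1, -1), (-1, 1), (-1, -1)
--     ]
--
--     for dr, dc in king_moves:
--         r, c = row + dr, col + dc
--         if 0 <= r < 8 and 0 <= c < 8:
--             if board_string[r * 8 + c] == attacker:
--                 return True
--     return False
-- ===== SOURCE B (Python) =====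
-- def is_attacked_by_king(board_string: str, row: int, col: int, attacker: str) -> bool:
--     """Check if position is attacked by enemy king (scan the 64 board squares)"""
--     for i, ch in enumerate(board_string[:64]):
--         if ch != attacker:
--             continue
--         r, c = divmod(i, 8)
--         if row - 1 <= r <= row + 1 and col - 1 <= c <= col + 1 and (r, c) != (row, col):
--             return True
--     return False
-- ===== Notes on version B (the rewrite author's own statement) =====
-- stated objective: alternative
-- what changed: B replaces A's loop over the 8 king-move offsets (indexing each neighbor square) by a single scan over the 64 board squares, testing each square holding the attacker for adjacency to (row, col).
-- outside the precondition, e.g. on is_attacked_by_king('k', 0, 1, 'k'): A raises IndexError, B returns True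
import Mathlib
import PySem

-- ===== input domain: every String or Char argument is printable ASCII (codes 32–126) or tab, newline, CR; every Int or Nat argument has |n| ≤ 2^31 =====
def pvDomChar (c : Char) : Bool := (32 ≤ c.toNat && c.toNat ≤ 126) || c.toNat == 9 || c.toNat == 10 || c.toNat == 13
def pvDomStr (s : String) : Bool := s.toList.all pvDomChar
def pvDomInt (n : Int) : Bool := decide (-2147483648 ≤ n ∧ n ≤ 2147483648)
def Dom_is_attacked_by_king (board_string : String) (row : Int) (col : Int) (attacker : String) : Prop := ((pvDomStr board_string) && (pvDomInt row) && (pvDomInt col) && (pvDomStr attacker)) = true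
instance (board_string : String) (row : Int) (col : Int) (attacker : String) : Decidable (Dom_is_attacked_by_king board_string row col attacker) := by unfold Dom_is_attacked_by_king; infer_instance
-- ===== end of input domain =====

-- B scans the 64 board squares for the attacker and tests Chebyshev adjacency, instead of
-- A's probe of the 8 king-move offsets; same cost, different traversal (objective: alternative).

-- ===== PORT A =====
def pvKingMoves : List (Int × Int) :=
  [(1, 0), (-1, 0), (0, 1), (0, -1), (1, 1), (1, -1), (-1, 1), (-1, -1)]

def is_attacked_by_king (board_string : String) (row : Int) (col : Int) (attacker : String) : Bool :=
  pvKingMoves.any fun d =>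
    let r := row + d.1
    let c := col + d.2
    if 0 ≤ r ∧ r < 8 ∧ 0 ≤ c ∧ c < 8 then
      match PySem.Str.pyGet? board_string (r * 8 + c) with
      | some ch => String.mk [ch] == attacker
      | none => false   -- Python raises IndexError here; such inputs are excluded by Pre_
    else false

-- ===== PORT B =====
def is_attacked_by_king_alt (board_string : String) (row : Int) (col : Int) (attacker : String) : Bool :=
  (PySem.List.enumerate (PySem.List.slice board_string.toList none (some 64))).any fun p =>
    if String.mk [p.2] == attacker then
      let r := PySem.Int.floordiv p.1 8
      let c := PySem.Int.mod p.1 8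
      decide (row - 1 ≤ r ∧ r ≤ row + 1 ∧ col - 1 ≤ c ∧ c ≤ col + 1 ∧ (r, c) ≠ (row, col))
    else false

-- ===== PRECONDITION & SPEC =====
-- Pre_ excludes exactly the inputs on which A raises IndexError: some in-board neighbor
-- square of (row, col) has index ≥ len(board_string).
def Pre_is_attacked_by_king (board_string : String) (row : Int) (col : Int) (attacker : String) : Prop :=
  ∀ d ∈ pvKingMoves,
    (0 ≤ row + d.1 ∧ row + d.1 < 8 ∧ 0 ≤ col + d.2 ∧ col + d.2 < 8) →
      (row + d.1) * 8 + (col + d.2) < (board_string.toList.length : Int)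

instance (board_string : String) (row : Int) (col : Int) (attacker : String) : Decidable (Pre_is_attacked_by_king board_string row col attacker) := by unfold Pre_is_attacked_by_king; infer_instance

def pvWitness_is_attacked_by_king : String × Int × Int × String :=
  ("rnbqkbnrpppppppp................................PPPPPPPPRNBQKBNR", 4, 4, "k")

def Spec_is_attacked_by_king (board_string : String) (row : Int) (col : Int) (attacker : String) (out : Bool) : Prop := out = is_attacked_by_king_alt board_string row col attacker
instance (board_string : String) (row : Int) (col : Int) (attacker : String) (out : Bool) : Decidable (Spec_is_attacked_by_king board_string row col attacker out) := by unfold Spec_is_attacked_by_king; infer_instance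

-- ===== CLAIM (what is proved, stated in full; the proofs are below) =====
def Claim_equal_is_attacked_by_king : Prop := ∀ (board_string : String) (row : Int) (col : Int) (attacker : String), Dom_is_attacked_by_king board_string row col attacker → Pre_is_attacked_by_king board_string row col attacker → Spec_is_attacked_by_king board_string row col attacker (is_attacked_by_king board_string row col attacker)


-- ===== LEMMAS AND PROOFS =====

theorem pv_main (board_string : String) (row : Int) (col : Int) (attacker : String)
    (hpre : Pre_is_attacked_by_king board_string row col attacker) :
    is_attacked_by_king board_string row col attacker =
      is_attacked_by_king_alt board_string row col attacker := by
  rw [Bool.eq_iff_iff]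
  unfold is_attacked_by_king is_attacked_by_king_alt
  rw [PySem.List.slice_to (xs := board_string.toList) (b := 64) (by norm_num)]
  simp only [List.any_eq_true]
  constructor
  · rintro ⟨d, hd, hbody⟩
    by_cases hin : 0 ≤ row + d.1 ∧ row + d.1 < 8 ∧ 0 ≤ col + d.2 ∧ col + d.2 < 8
    · simp only [if_pos hin] at hbody
      have hlen := hpre d hd hin
      set idx : Int := (row + d.1) * 8 + (col + d.2) with hidx
      have hidx0 : 0 ≤ idx := by obtain ⟨h1, h2, h3, h4⟩ := hin; positivity
      have hk : idx.toNat < board_string.toList.length := by omega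
      have hget : PySem.Str.pyGet? board_string idx = some board_string.toList[idx.toNat] := by
        have := PySem.List.pyGet?_eq_some_getElem (xs := board_string.toList) hidx0 (by omega)
        simpa [PySem.Str.pyGet?] using this
      rw [hget] at hbody
      have hidx64 : idx.toNat < 64 := by
        obtain ⟨h1, h2, h3, h4⟩ := hin; omega
      refine ⟨((idx.toNat : Int), board_string.toList[idx.toNat]), ?_, ?_⟩
      · rw [PySem.List.mem_enumerate_iff]
        refine ⟨idx.toNat, by rw [List.length_take]; omega, ?_⟩
        simp [List.getElem_take]
      · simp only [hbody, if_pos]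
        have hfd : PySem.Int.floordiv (idx.toNat : Int) 8 = row + d.1 := by
          rw [PySem.Int.floordiv_eq_ediv_of_pos (by omega)]
          obtain ⟨h1, h2, h3, h4⟩ := hin; omega
        have hmd : PySem.Int.mod (idx.toNat : Int) 8 = col + d.2 := by
          rw [PySem.Int.mod_eq_emod_of_pos (by omega)]
          obtain ⟨h1, h2, h3, h4⟩ := hin; omega
        simp only [hfd, hmd]
        have hdmem : d = (1, 0) ∨ d = (-1, 0) ∨ d = (0, 1) ∨ d = (0, -1) ∨ d = (1, 1) ∨
            d = (1, -1) ∨ d = (-1, 1) ∨ d = (-1, -1) := by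
          simpa [pvKingMoves] using hd
        rw [decide_eq_true_iff]
        obtain ⟨h1, h2, h3, h4⟩ := hin
        rcases hdmem with h | h | h | h | h | h | h | h <;>
          (subst h; refine ⟨by omega, by omega, by omega, by omega, ?_⟩ <;>
            simp [Prod.ext_iff] <;> omega)
    · simp [if_neg hin] at hbody
  · rintro ⟨p, hp, hbody⟩
    rw [PySem.List.mem_enumerate_iff] at hp
    obtain ⟨k, hk, hpk⟩ := hp
    rw [List.length_take] at hk
    have hk64 : k < 64 := by omega
    have hklen : k < board_string.toList.length := by omega
    subst hpk
    simp only [zero_add, List.getElem_take] at hbody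
    by_cases hch : String.mk [board_string.toList[k]] == attacker
    · simp only [hch, if_pos] at hbody
      rw [decide_eq_true_iff] at hbody
      rw [PySem.Int.floordiv_eq_ediv_of_pos (by omega), PySem.Int.mod_eq_emod_of_pos (by omega)]
        at hbody
      obtain ⟨hb1, hb2, hb3, hb4, hne⟩ := hbody
      set r : Int := (k : Int) / 8 with hr
      set c : Int := (k : Int) % 8 with hc
      have hrange : 0 ≤ r ∧ r < 8 ∧ 0 ≤ c ∧ c < 8 := by constructor <;> omega
      have hrec : r * 8 + c = (k : Int) := by omega
      have hne' : r ≠ row ∨ c ≠ col := by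
        rcases eq_or_ne r row with h1 | h1
        · rcases eq_or_ne c col with h2 | h2
          · exact absurd (by simp [h1, h2]) hne
          · exact Or.inr h2
        · exact Or.inl h1
      have har : r - row = -1 ∨ r - row = 0 ∨ r - row = 1 := by omega
      have hac : c - col = -1 ∨ c - col = 0 ∨ c - col = 1 := by omega
      have hd : (r - row, c - col) ∈ pvKingMoves := by
        rcases har with h1 | h1 | h1 <;> rcases hac with h2 | h2 | h2 <;>
          simp [pvKingMoves, Prod.ext_iff, h1, h2] <;> omega
      refine ⟨(r - row, c - col), hd, ?_⟩
      have hin : 0 ≤ row + (r - row) ∧ row + (r - row) < 8 ∧ 0 ≤ col + (c - col) ∧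
          col + (c - col) < 8 := by omega
      rw [if_pos hin]
      have hidx : (row + (r - row)) * 8 + (col + (c - col)) = (k : Int) := by omega
      rw [hidx]
      have hget : PySem.Str.pyGet? board_string (k : Int) = some board_string.toList[k] := by
        have := PySem.List.pyGet?_eq_some_getElem (xs := board_string.toList)
          (i := (k : Int)) (by omega) (by omega)
        simpa [PySem.Str.pyGet?] using this
      rw [hget]
      simpa using hch
    · simp [hch] at hbody

-- ===== VERDICT (by name: the statement is the Claim_ definition above) =====
theorem is_attacked_by_king_spec : Claim_equal_is_attacked_by_king := by
  intro board_string row col attacker _ hpre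
  unfold Spec_is_attacked_by_king
  exact pv_main board_string row col attacker hpre
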